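-- pv_equiv track=rewrite | github.com/JudoWill/flELM | mammal_bird.py | get_common_elms
-- ===== SOURCE A (Python) =====
-- from collections import defaultdict
--
-- def get_common_elms(d):
--     """enter [] of species 2 [] of strains2protein2elms"""
--
--     protein2elm = defaultdict(dict)
--     elms = {}
--     start_strain = d[0][0] # needs to have all proteins
--     for protein in start_strain:
--         for elm in start_strain[protein]:
--             not_found = False
--             for a_strain in d[0][1:]:
--                 if protein in a_strain:
--                     if not elm in a_strain[protein]:
--                         not_found = True
--             for species in d[1:]:
--                 for a_strain in species:
--                     if protein in a_strain:
--                         if not elm in a_strain[protein]: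
--                             not_found = True
--             if not not_found:
--                 protein2elm[protein][elm] = True
--                 elms[elm] = True
--     return (protein2elm, elms)
-- ===== SOURCE B (Python) =====
-- def get_common_elms(d):
--     """enter [] of species 2 [] of strains2protein2elms"""
--     start_strain = d[0][0]  # needs to have all proteins
--     others = d[0][1:] + [strain for species in d[1:] for strain in species]
--     cnt_p = {}
--     cnt_pe = {}
--     for strain in others:
--         for protein, elmd in strain.items():
--             cnt_p[protein] = cnt_p.get(protein, 0) + 1
--             for elm in elmd:
--                 cnt_pe[(protein, elm)] = cnt_pe.get((protein, elm), 0) + 1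
--     protein2elm = {}
--     elms = {}
--     for protein, elmd in start_strain.items():
--         common = [elm for elm in elmd
--                   if cnt_pe.get((protein, elm), 0) == cnt_p.get(protein, 0)]
--         if common:
--             protein2elm[protein] = {elm: True for elm in common}
--         for elm in common:
--             elms[elm] = True
--     return (protein2elm, elms)
-- ===== Notes on version B (the rewrite author's own statement) =====
-- stated objective: alternative
-- what changed: Replaces A's per-(protein,elm) scan over every other strain by a single counting pass (strains-per-protein and strains-per-(protein,elm)) followed by a count comparison.
import Mathlib
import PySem

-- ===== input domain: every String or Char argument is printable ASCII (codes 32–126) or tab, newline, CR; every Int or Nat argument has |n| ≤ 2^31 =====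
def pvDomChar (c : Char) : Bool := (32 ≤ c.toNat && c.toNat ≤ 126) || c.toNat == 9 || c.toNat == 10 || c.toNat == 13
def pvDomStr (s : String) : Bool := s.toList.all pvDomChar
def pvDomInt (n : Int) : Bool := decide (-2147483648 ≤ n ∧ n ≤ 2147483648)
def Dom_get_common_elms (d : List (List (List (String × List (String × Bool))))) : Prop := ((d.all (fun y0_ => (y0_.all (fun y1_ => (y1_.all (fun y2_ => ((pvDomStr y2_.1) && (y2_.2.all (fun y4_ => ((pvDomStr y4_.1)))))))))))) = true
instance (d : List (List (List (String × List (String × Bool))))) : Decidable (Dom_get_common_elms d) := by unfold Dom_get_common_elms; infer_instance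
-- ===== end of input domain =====

-- B replaces A's per-(protein,elm) scan over every other strain by one counting pass
-- (strains-per-protein and strains-per-(protein,elm)) followed by a count comparison.

-- shared input decoding: a Python strain dict {protein: {elm: bool}} arrives as an
-- association list; PySem.Dict.ofList reproduces dict(...)'s duplicate-key collapse.
def pvToDict (s : List (String × List (String × Bool))) :
    PySem.Dict String (PySem.Dict String Bool) :=
  PySem.Dict.ofList (s.map (fun p => (p.1, PySem.Dict.ofList p.2)))

-- ===== PORT A =====
def get_common_elms (d : List (List (List (String × List (String × Bool))))) : (List (String × List (String × Bool))) × (List (String × Bool)) :=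
  let start_strain := pvToDict d.headI.headI
  let res := start_strain.items.foldl (fun st pr =>
      pr.2.keys.foldl (fun st elm =>
        let nf1 : Bool := ((d.headI.drop 1).map pvToDict).foldl (fun nf a_strain =>
            if a_strain.contains pr.1 then
              (if !((a_strain.getD pr.1 PySem.Dict.empty).contains elm) then true else nf)
            else nf) false
        let nf2 : Bool := ((d.drop 1).map (fun sp => sp.map pvToDict)).foldl (fun nf species =>
            species.foldl (fun nf a_strain =>
              if a_strain.contains pr.1 then
                (if !((a_strain.getD pr.1 PySem.Dict.empty).contains elm) then true else nf)
              else nf) nf) nf1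
        if !nf2 then
          (st.1.modify pr.1 PySem.Dict.empty (fun dd => dd.insert elm true), st.2.insert elm true)
        else st) st)
    ((PySem.Dict.empty : PySem.Dict String (PySem.Dict String Bool)),
     (PySem.Dict.empty : PySem.Dict String Bool))
  (res.1.items.map (fun p => (p.1, p.2.items)), res.2.items)

-- ===== PORT B =====
def get_common_elms_alt (d : List (List (List (String × List (String × Bool))))) : (List (String × List (String × Bool))) × (List (String × Bool)) :=
  let start_strain := pvToDict d.headI.headI
  let others := (d.headI.drop 1 ++ (d.drop 1).flatten).map pvToDict
  let cnts := others.foldl (fun (c : PySem.Dict String Int × PySem.Dict (String × String) Int) strain =>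
      strain.items.foldl (fun c pr =>
        (c.1.insert pr.1 (c.1.getD pr.1 0 + 1),
         pr.2.keys.foldl (fun ce elm => ce.insert (pr.1, elm) (ce.getD (pr.1, elm) 0 + 1)) c.2)) c)
    (PySem.Dict.empty, PySem.Dict.empty)
  let res := start_strain.items.foldl (fun st pr =>
      let common := pr.2.keys.filter (fun elm => cnts.2.getD (pr.1, elm) 0 == cnts.1.getD pr.1 0)
      (if common.isEmpty then st.1
       else st.1.insert pr.1 (common.foldl (fun dd elm => dd.insert elm true) PySem.Dict.empty),
       common.foldl (fun ee elm => ee.insert elm true) st.2))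
    ((PySem.Dict.empty : PySem.Dict String (PySem.Dict String Bool)),
     (PySem.Dict.empty : PySem.Dict String Bool))
  (res.1.items.map (fun p => (p.1, p.2.items)), res.2.items)

-- ===== PRECONDITION & SPEC =====
-- Pre_ excludes exactly the inputs where d[0][0] raises IndexError in A (and in B).
def Pre_get_common_elms (d : List (List (List (String × List (String × Bool))))) : Prop :=
  d ≠ [] ∧ d.headI ≠ []
instance (d : List (List (List (String × List (String × Bool))))) : Decidable (Pre_get_common_elms d) := by unfold Pre_get_common_elms; infer_instance

def pvWitness_get_common_elms : (List (List (List (String × List (String × Bool))))) :=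
  [[[("p", [("e", true)])], [("p", [("e", true)]), ("q", [])]], [[]]]

def Spec_get_common_elms (d : List (List (List (String × List (String × Bool))))) (out : (List (String × List (String × Bool))) × (List (String × Bool))) : Prop := out = get_common_elms_alt d
instance (d : List (List (List (String × List (String × Bool))))) (out : (List (String × List (String × Bool))) × (List (String × Bool))) : Decidable (Spec_get_common_elms d out) := by unfold Spec_get_common_elms; infer_instance

-- ===== CLAIM (what is proved, stated in full; the proofs are below) =====
def Claim_equal_get_common_elms : Prop := ∀ (d : List (List (List (String × List (String × Bool))))), Dom_get_common_elms d → Pre_get_common_elms d → Spec_get_common_elms d (get_common_elms d)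

-- ===== LEMMAS AND PROOFS =====

-- L1: fold-or
theorem pv_foldl_if_or {α : Type} (P : α → Bool) (l : List α) (b : Bool) :
    l.foldl (fun nf x => if P x then true else nf) b = (b || l.any P) := by
  induction l generalizing b with
  | nil => simp
  | cons x xs ih =>
    by_cases h : P x = true
    · simp only [List.foldl_cons, if_pos h, List.any_cons, h, Bool.true_or, Bool.or_true]
      rw [ih]; simp
    · simp only [List.foldl_cons, if_neg h, List.any_cons]
      rw [ih]
      cases b <;> simp [h]

-- count in a mapped pair list
theorem pv_count_map_pair (a p : String) (e : String) (ks : List String) :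
    List.count (p, e) (ks.map (fun x => (a, x))) = if a = p then ks.count e else 0 := by
  by_cases h : a = p
  · subst h
    simp only [if_pos rfl]
    exact List.count_map_of_injective _ _ (fun x y hxy => by
      simpa using congrArg Prod.snd hxy) _
  · rw [if_neg h]
    refine List.count_eq_zero_of_not_mem ?_
    intro hmem
    rw [List.mem_map] at hmem
    obtain ⟨x, -, hx⟩ := hmem
    exact h (congrArg Prod.fst hx)

-- countP equality characterisation
theorem pv_countP_eq_iff {α : Type} (l : List α) (q r : α → Bool)
    (h : ∀ x, r x = true → q x = true) :
    (l.countP r = l.countP q) ↔ ∀ x ∈ l, q x = true → r x = true := by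
  induction l with
  | nil => simp
  | cons x xs ih =>
    have hmono : xs.countP r ≤ xs.countP q := List.countP_mono_left (fun x _ => h x)
    by_cases hq : q x = true
    · by_cases hr : r x = true
      · simp [List.countP_cons, hq, hr, ih]
      · rw [List.countP_cons, List.countP_cons, if_pos hq, if_neg hr]
        constructor
        · intro heq; exfalso; omega
        · intro hall; exact absurd (hall x (List.mem_cons_self) hq) hr
    · have hr : r x = true → False := fun hrx => hq (h x hrx)
      rw [List.countP_cons, List.countP_cons, if_neg hq, if_neg hr]
      simp only [add_zero]
      constructor
      · intro heq y hy hqy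
        rcases List.mem_cons.mp hy with rfl | hy'
        · exact absurd hqy hq
        · exact (ih.mp heq) y hy' hqy
      · intro hall
        exact ih.mpr (fun y hy hqy => hall y (List.mem_cons_of_mem _ hy) hqy)

-- strains-per-protein counting
theorem pv_cntp_strain (s : PySem.Dict String (PySem.Dict String Bool))
    (hs : s.keys.Nodup) (c : PySem.Dict String Int) (p : String) :
    (s.items.foldl (fun c pr => c.insert pr.1 (c.getD pr.1 0 + 1)) c).getD p 0
      = c.getD p 0 + (if s.contains p then 1 else 0) := by
  have h1 : s.items.foldl (fun c pr => c.insert pr.1 (c.getD pr.1 0 + 1)) c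
      = (s.items.map (fun x => x.1)).foldl (fun c k => c.insert k (c.getD k 0 + 1)) c := by
    rw [List.foldl_map]
  have h2 : s.items.map (fun x => x.1) = s.keys := rfl
  rw [h1, h2, PySem.Dict.getD_foldl_insert_add_one]
  congr 1
  rw [PySem.Dict.contains_eq_decide_mem_keys]
  by_cases hm : p ∈ s.keys
  · rw [List.count_eq_one_of_mem hs hm]; simp [hm]
  · rw [List.count_eq_zero_of_not_mem hm]; simp [hm]

theorem pv_cntp_list (ls : List (PySem.Dict String (PySem.Dict String Bool)))
    (c : PySem.Dict String Int) (p : String) (h : ∀ s ∈ ls, s.keys.Nodup) :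
    (ls.foldl (fun c s => s.items.foldl (fun c pr => c.insert pr.1 (c.getD pr.1 0 + 1)) c) c).getD p 0
      = c.getD p 0 + (ls.countP (fun s => s.contains p) : Int) := by
  induction ls generalizing c with
  | nil => simp
  | cons s ls ih =>
    rw [List.foldl_cons, ih _ (fun t ht => h t (List.mem_cons_of_mem _ ht)),
      pv_cntp_strain s (h s List.mem_cons_self) c p, List.countP_cons]
    by_cases hc : s.contains p = true <;> simp [hc] <;> push_cast <;> ring

-- strains-per-(protein,elm) counting
theorem pv_cntpe_item (a : String) (ks : List String)
    (c : PySem.Dict (String × String) Int) (p e : String) :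
    (ks.foldl (fun ce e' => ce.insert (a, e') (ce.getD (a, e') 0 + 1)) c).getD (p, e) 0
      = c.getD (p, e) 0 + (if a = p then (ks.count e : Int) else 0) := by
  have h1 : ks.foldl (fun ce e' => ce.insert (a, e') (ce.getD (a, e') 0 + 1)) c
      = (ks.map (fun x => (a, x))).foldl (fun ce k => ce.insert k (ce.getD k 0 + 1)) c := by
    rw [List.foldl_map]
  rw [h1, PySem.Dict.getD_foldl_insert_add_one, pv_count_map_pair a p e ks]
  by_cases h : a = p <;> simp [h]

theorem pv_cntpe_items (l : List (String × PySem.Dict String Bool))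
    (c : PySem.Dict (String × String) Int) (p e : String)
    (hnd : (l.map (fun x => x.1)).Nodup) (hv : ∀ pr ∈ l, pr.2.keys.Nodup) :
    (l.foldl (fun c pr => pr.2.keys.foldl
        (fun ce e' => ce.insert (pr.1, e') (ce.getD (pr.1, e') 0 + 1)) c) c).getD (p, e) 0
      = c.getD (p, e) 0 +
        (match l.find? (fun pr => pr.1 == p) with
         | some pr => if pr.2.contains e then 1 else 0
         | none => 0) := by
  induction l generalizing c with
  | nil => simp
  | cons pr l ih =>
    rw [List.foldl_cons, ih _ (by simpa using hnd.of_cons)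
      (fun t ht => hv t (List.mem_cons_of_mem _ ht)), pv_cntpe_item]
    by_cases hp : pr.1 = p
    · have hfind : List.find? (fun pr => pr.1 == p) (pr :: l) = some pr := by
        rw [List.find?_cons_of_pos (by simp [hp])]
      have htail : List.find? (fun q => q.1 == p) l = none := by
        rw [List.find?_eq_none]
        intro x hx
        simp only [beq_iff_eq]
        intro hxp
        have : pr.1 ∈ l.map (fun x => x.1) := by
          rw [hp, ← hxp] at *; exact List.mem_map_of_mem hx
        simp only [List.map_cons, List.nodup_cons] at hnd
        exact hnd.1 this
      rw [hfind, htail, if_pos hp]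
      have hcnt : (pr.2.keys.count e : Int) = if pr.2.contains e then 1 else 0 := by
        rw [PySem.Dict.contains_eq_decide_mem_keys]
        by_cases hm : e ∈ pr.2.keys
        · rw [List.count_eq_one_of_mem (hv pr List.mem_cons_self) hm]; simp [hm]
        · rw [List.count_eq_zero_of_not_mem hm]; simp [hm]
      rw [hcnt]; ring
    · have hfind : List.find? (fun pr => pr.1 == p) (pr :: l) = List.find? (fun q => q.1 == p) l := by
        rw [List.find?_cons_of_neg (by simp [hp])]
      rw [hfind, if_neg hp]; ring

theorem pv_cntpe_strain (s : PySem.Dict String (PySem.Dict String Bool))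
    (hs : s.keys.Nodup) (hv : ∀ v ∈ s.values, v.keys.Nodup)
    (c : PySem.Dict (String × String) Int) (p e : String) :
    (s.items.foldl (fun c pr => pr.2.keys.foldl
        (fun ce e' => ce.insert (pr.1, e') (ce.getD (pr.1, e') 0 + 1)) c) c).getD (p, e) 0
      = c.getD (p, e) 0 +
        (if s.contains p && (s.getD p PySem.Dict.empty).contains e then 1 else 0) := by
  rw [pv_cntpe_items s.items c p e hs
    (fun pr hpr => hv pr.2 (List.mem_map_of_mem hpr))]
  congr 1
  cases hfind : List.find? (fun pr => pr.1 == p) s.items with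
  | none =>
    have : s.contains p = false := by
      simp only [PySem.Dict.contains]
      rw [List.find?_eq_none] at hfind
      simp only [List.any_eq_false]
      exact fun x hx => by simpa using hfind x hx
    simp [this]
  | some pr =>
    have hc : s.contains p = true := by
      simp only [PySem.Dict.contains, List.any_eq_true]
      exact ⟨pr, List.mem_of_find?_eq_some hfind, (by simpa using List.find?_some hfind)⟩
    have hg : s.getD p PySem.Dict.empty = pr.2 := by
      simp only [PySem.Dict.getD, PySem.Dict.get?, hfind, Option.map_some, Option.getD_some]
    rw [hc, hg]; simp

theorem pv_cntpe_list (ls : List (PySem.Dict String (PySem.Dict String Bool)))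
    (c : PySem.Dict (String × String) Int) (p e : String)
    (h : ∀ s ∈ ls, s.keys.Nodup ∧ ∀ v ∈ s.values, v.keys.Nodup) :
    (ls.foldl (fun c s => s.items.foldl (fun c pr => pr.2.keys.foldl
        (fun ce e' => ce.insert (pr.1, e') (ce.getD (pr.1, e') 0 + 1)) c) c) c).getD (p, e) 0
      = c.getD (p, e) 0 +
        (ls.countP (fun s => s.contains p && (s.getD p PySem.Dict.empty).contains e) : Int) := by
  induction ls generalizing c with
  | nil => simp
  | cons s ls ih =>
    rw [List.foldl_cons, ih _ (fun t ht => h t (List.mem_cons_of_mem _ ht)),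
      pv_cntpe_strain s (h s List.mem_cons_self).1 (h s List.mem_cons_self).2 c p e,
      List.countP_cons]
    by_cases hc : (s.contains p && (s.getD p PySem.Dict.empty).contains e) = true <;>
      simp [hc] <;> push_cast <;> ring

-- values of an updated dict come from the old values or the pair list
theorem pv_values_update {κ ν : Type} [BEq κ] [LawfulBEq κ]
    (ps : List (κ × ν)) (d : PySem.Dict κ ν) (v : ν)
    (h : v ∈ (d.update ps).values) : v ∈ d.values ∨ v ∈ ps.map (fun x => x.2) := by
  induction ps generalizing d with
  | nil => exact Or.inl h
  | cons q ps ih =>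
    rcases ih (d.insert q.1 q.2) (by simpa [PySem.Dict.update] using h) with h' | h'
    · rcases PySem.Dict.mem_values_insert d q.1 q.2 v h' with rfl | h''
      · exact Or.inr (by simp)
      · exact Or.inl h''
    · exact Or.inr (List.mem_cons_of_mem _ h')

theorem pv_toDict_keys_nodup (s : List (String × List (String × Bool))) :
    (pvToDict s).keys.Nodup := PySem.Dict.nodup_keys_ofList _

theorem pv_toDict_values (s : List (String × List (String × Bool)))
    (v : PySem.Dict String Bool) (h : v ∈ (pvToDict s).values) : v.keys.Nodup := by
  unfold pvToDict PySem.Dict.ofList at h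
  rcases pv_values_update _ _ _ h with h' | h'
  · simp [PySem.Dict.values, PySem.Dict.empty] at h'
  · rw [List.map_map] at h'
    obtain ⟨x, -, rfl⟩ := List.mem_map.mp h'
    exact PySem.Dict.nodup_keys_ofList _

-- the "bad strain" predicate of A's inner scan
def pvBad (p e : String) (s : PySem.Dict String (PySem.Dict String Bool)) : Bool :=
  s.contains p && !((s.getD p PySem.Dict.empty).contains e)

def pvL (d : List (List (List (String × List (String × Bool))))) :
    List (PySem.Dict String (PySem.Dict String Bool)) :=
  (d.headI.drop 1 ++ (d.drop 1).flatten).map pvToDict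

theorem pv_L_props (d : List (List (List (String × List (String × Bool)))))
    (s : PySem.Dict String (PySem.Dict String Bool)) (h : s ∈ pvL d) :
    s.keys.Nodup ∧ ∀ v ∈ s.values, v.keys.Nodup := by
  obtain ⟨t, -, rfl⟩ := List.mem_map.mp h
  exact ⟨pv_toDict_keys_nodup t, fun v hv => pv_toDict_values t v hv⟩

-- A's nested not_found scan is an `any` over pvL
theorem pv_nfA (d : List (List (List (String × List (String × Bool))))) (p e : String) :
    ((d.drop 1).map (fun sp => sp.map pvToDict)).foldl (fun nf species =>
        species.foldl (fun nf a_strain =>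
          if a_strain.contains p then
            (if !((a_strain.getD p PySem.Dict.empty).contains e) then true else nf)
          else nf) nf)
      (((d.headI.drop 1).map pvToDict).foldl (fun nf a_strain =>
          if a_strain.contains p then
            (if !((a_strain.getD p PySem.Dict.empty).contains e) then true else nf)
          else nf) false)
    = (pvL d).any (pvBad p e) := by
  have hstep : (fun (nf : Bool) (a_strain : PySem.Dict String (PySem.Dict String Bool)) =>
      if a_strain.contains p then
        (if !((a_strain.getD p PySem.Dict.empty).contains e) then true else nf)
      else nf) = fun nf s => if pvBad p e s then true else nf := by
    funext nf s
    by_cases h1 : s.contains p = true <;>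
      by_cases h2 : ((s.getD p PySem.Dict.empty).contains e) = true <;>
      simp [pvBad, h1, h2]
  rw [hstep, ← List.foldl_flatten, ← List.map_flatten, ← List.foldl_append, ← List.map_append,
    pv_foldl_if_or]
  simp [pvL]

-- the two counting dicts of B characterised
def pvCntP (d : List (List (List (String × List (String × Bool))))) : PySem.Dict String Int :=
  (pvL d).foldl (fun c s => s.items.foldl (fun c pr => c.insert pr.1 (c.getD pr.1 0 + 1)) c)
    PySem.Dict.empty

def pvCntPE (d : List (List (List (String × List (String × Bool))))) :
    PySem.Dict (String × String) Int :=
  (pvL d).foldl (fun c s => s.items.foldl (fun c pr => pr.2.keys.foldl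
      (fun ce e' => ce.insert (pr.1, e') (ce.getD (pr.1, e') 0 + 1)) c) c)
    PySem.Dict.empty

theorem pv_cnts_split (d : List (List (List (String × List (String × Bool))))) :
    (pvL d).foldl (fun (c : PySem.Dict String Int × PySem.Dict (String × String) Int) strain =>
        strain.items.foldl (fun c pr =>
          (c.1.insert pr.1 (c.1.getD pr.1 0 + 1),
           pr.2.keys.foldl (fun ce elm => ce.insert (pr.1, elm) (ce.getD (pr.1, elm) 0 + 1)) c.2)) c)
      (PySem.Dict.empty, PySem.Dict.empty)
    = (pvCntP d, pvCntPE d) := by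
  have hstep : (fun (c : PySem.Dict String Int × PySem.Dict (String × String) Int)
      (strain : PySem.Dict String (PySem.Dict String Bool)) =>
      strain.items.foldl (fun c (pr : String × PySem.Dict String Bool) =>
        (c.1.insert pr.1 (c.1.getD pr.1 0 + 1),
         pr.2.keys.foldl (fun ce elm => ce.insert (pr.1, elm) (ce.getD (pr.1, elm) 0 + 1)) c.2)) c)
      = fun c strain =>
        (strain.items.foldl (fun c1 pr => c1.insert pr.1 (c1.getD pr.1 0 + 1)) c.1,
         strain.items.foldl (fun c2 pr => pr.2.keys.foldl
           (fun ce elm => ce.insert (pr.1, elm) (ce.getD (pr.1, elm) 0 + 1)) c2) c.2) := by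
    funext c strain
    obtain ⟨c1, c2⟩ := c
    exact PySem.List.foldl_prod_mk
      (fun (x : PySem.Dict String Int) (pr : String × PySem.Dict String Bool) => x.insert pr.1 (x.getD pr.1 0 + 1))
      (fun (x : PySem.Dict (String × String) Int) (pr : String × PySem.Dict String Bool) => pr.2.keys.foldl
        (fun ce elm => ce.insert (pr.1, elm) (ce.getD (pr.1, elm) 0 + 1)) x)
      strain.items c1 c2
  rw [hstep, pvCntP, pvCntPE]
  exact PySem.List.foldl_prod_mk
    (fun (x : PySem.Dict String Int) (strain : PySem.Dict String (PySem.Dict String Bool)) =>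
      strain.items.foldl (fun c1 pr => c1.insert pr.1 (c1.getD pr.1 0 + 1)) x)
    (fun (x : PySem.Dict (String × String) Int) (strain : PySem.Dict String (PySem.Dict String Bool)) =>
      strain.items.foldl (fun c2 pr => pr.2.keys.foldl
        (fun ce elm => ce.insert (pr.1, elm) (ce.getD (pr.1, elm) 0 + 1)) c2) x)
    (pvL d) PySem.Dict.empty PySem.Dict.empty

-- B's count test equals the negation of A's scan
theorem pv_dec_eq (d : List (List (List (String × List (String × Bool))))) (p e : String) :
    ((pvCntPE d).getD (p, e) 0 == (pvCntP d).getD p 0) = !((pvL d).any (pvBad p e)) := by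
  rw [Bool.eq_iff_iff]
  have hq := pv_cntp_list (pvL d) PySem.Dict.empty p (fun s hs => (pv_L_props d s hs).1)
  have hr := pv_cntpe_list (pvL d) PySem.Dict.empty p e (fun s hs => pv_L_props d s hs)
  rw [pvCntP, pvCntPE] at *
  rw [hq, hr]
  simp only [PySem.Dict.getD_empty, zero_add, beq_iff_eq, Int.natCast_inj]
  rw [pv_countP_eq_iff _ _ _ (fun s h => by
    simpa using (Bool.and_elim_left (by simpa using h)))]
  rw [Bool.not_eq_eq_eq_not, Bool.not_true, List.any_eq_false]
  constructor
  · intro h s hs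
    have := h s hs
    by_cases h1 : s.contains p = true
    · have h2 := this h1
      simp only [Bool.and_eq_true] at h2
      simp [pvBad, h1, h2.2]
    · simp [pvBad, h1]
  · intro h s hs h1
    have := h s hs
    simp only [pvBad, h1, Bool.true_and, Bool.not_eq_eq_eq_not, Bool.not_true,
      Bool.not_eq_false] at this
    simp [h1, this]

-- A's per-protein insertion loop, first component
theorem pv_inner_ins (p : String) (cs : List String)
    (P : PySem.Dict String (PySem.Dict String Bool)) (c : PySem.Dict String Bool) :
    cs.foldl (fun P e => P.insert p ((P.getD p PySem.Dict.empty).insert e true)) (P.insert p c)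
      = P.insert p (cs.foldl (fun dd e => dd.insert e true) c) := by
  induction cs generalizing c with
  | nil => rfl
  | cons e cs ih =>
    rw [List.foldl_cons, PySem.Dict.getD_insert_self, PySem.Dict.insert_insert_self, ih,
      List.foldl_cons]

theorem pv_inner_p (p : String) (cs : List String)
    (P : PySem.Dict String (PySem.Dict String Bool)) (h : P.contains p = false) :
    cs.foldl (fun P e => P.insert p ((P.getD p PySem.Dict.empty).insert e true)) P
      = if cs.isEmpty then P
        else P.insert p (cs.foldl (fun dd e => dd.insert e true) PySem.Dict.empty) := by
  cases cs with
  | nil => rfl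
  | cons e cs =>
    rw [List.foldl_cons, PySem.Dict.getD_of_not_contains P _ h, pv_inner_ins, List.isEmpty_cons,
      if_neg (by simp), List.foldl_cons]

-- A's per-protein loop equals B's per-protein step
theorem pv_inner (f : String → String → Bool) (p : String) (es : List String)
    (st : PySem.Dict String (PySem.Dict String Bool) × PySem.Dict String Bool)
    (h : st.1.contains p = false) :
    es.foldl (fun st e => if f p e then
        (st.1.insert p ((st.1.getD p PySem.Dict.empty).insert e true), st.2.insert e true)
      else st) st
    = (if (es.filter (f p)).isEmpty then st.1
       else st.1.insert p ((es.filter (f p)).foldl (fun dd e => dd.insert e true) PySem.Dict.empty),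
       (es.filter (f p)).foldl (fun ee e => ee.insert e true) st.2) := by
  rw [← List.foldl_filter]
  obtain ⟨P, E⟩ := st
  rw [PySem.List.foldl_prod_mk
    (fun (P : PySem.Dict String (PySem.Dict String Bool)) e =>
      P.insert p ((P.getD p PySem.Dict.empty).insert e true))
    (fun (E : PySem.Dict String Bool) e => E.insert e true) (es.filter (f p)) P E]
  rw [pv_inner_p p _ P h]

-- the outer loop over the start strain
theorem pv_outer (f : String → String → Bool) (items : List (String × PySem.Dict String Bool))
    (st : PySem.Dict String (PySem.Dict String Bool) × PySem.Dict String Bool)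
    (hnd : (items.map (fun x => x.1)).Nodup)
    (hst : ∀ q ∈ items.map (fun x => x.1), st.1.contains q = false) :
    items.foldl (fun st pr => pr.2.keys.foldl (fun st e => if f pr.1 e then
        (st.1.insert pr.1 ((st.1.getD pr.1 PySem.Dict.empty).insert e true), st.2.insert e true)
      else st) st) st
    = items.foldl (fun st pr =>
        (if (pr.2.keys.filter (f pr.1)).isEmpty then st.1
         else st.1.insert pr.1 ((pr.2.keys.filter (f pr.1)).foldl
           (fun dd e => dd.insert e true) PySem.Dict.empty),
         (pr.2.keys.filter (f pr.1)).foldl (fun ee e => ee.insert e true) st.2)) st := by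
  induction items generalizing st with
  | nil => rfl
  | cons pr items ih =>
    rw [List.foldl_cons, List.foldl_cons,
      pv_inner f pr.1 pr.2.keys st (hst pr.1 (by simp))]
    refine ih _ (by simpa using hnd.of_cons) ?_
    intro q hq
    have hqne : q ≠ pr.1 := by
      simp only [List.map_cons, List.nodup_cons] at hnd
      rintro rfl
      exact hnd.1 hq
    have hq0 : st.1.contains q = false := hst q (List.mem_cons_of_mem _ hq)
    by_cases hemp : (pr.2.keys.filter (f pr.1)).isEmpty
    · simpa [hemp] using hq0
    · rw [if_neg hemp, PySem.Dict.contains_insert]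
      simp [hqne, hq0]

theorem pv_main (d : List (List (List (String × List (String × Bool))))) :
    get_common_elms d = get_common_elms_alt d := by
  unfold get_common_elms get_common_elms_alt
  dsimp only
  have hsplit := pv_cnts_split d
  simp only [pvL] at hsplit
  rw [hsplit]
  have hnd : ((pvToDict d.headI.headI).items.map (fun x => x.1)).Nodup := by
    have := pv_toDict_keys_nodup d.headI.headI
    simpa [PySem.Dict.keys] using this
  have hkey := pv_outer (fun p e => ((pvCntPE d).getD (p, e) 0 == (pvCntP d).getD p 0))
    (pvToDict d.headI.headI).items (PySem.Dict.empty, PySem.Dict.empty) hnd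
    (fun q _ => PySem.Dict.contains_empty q)
  have hstepA : (fun (st : PySem.Dict String (PySem.Dict String Bool) × PySem.Dict String Bool)
      (pr : String × PySem.Dict String Bool) =>
      pr.2.keys.foldl (fun st elm =>
        if !(((d.drop 1).map (fun sp => sp.map pvToDict)).foldl (fun nf species =>
            species.foldl (fun nf a_strain =>
              if a_strain.contains pr.1 then
                (if !((a_strain.getD pr.1 PySem.Dict.empty).contains elm) then true else nf)
              else nf) nf)
          (((d.headI.drop 1).map pvToDict).foldl (fun nf a_strain =>
              if a_strain.contains pr.1 then
                (if !((a_strain.getD pr.1 PySem.Dict.empty).contains elm) then true else nf)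
              else nf) false))
        then
          (st.1.modify pr.1 PySem.Dict.empty (fun dd => dd.insert elm true), st.2.insert elm true)
        else st) st)
      = fun st pr => pr.2.keys.foldl (fun st elm =>
          if ((pvCntPE d).getD (pr.1, elm) 0 == (pvCntP d).getD pr.1 0) then
            (st.1.insert pr.1 ((st.1.getD pr.1 PySem.Dict.empty).insert elm true),
             st.2.insert elm true)
          else st) st := by
    funext st pr
    congr 1
    funext st elm
    rw [pv_nfA d pr.1 elm, ← pv_dec_eq d pr.1 elm]
    rfl
  rw [hstepA, hkey]


-- ===== VERDICT (by name: the statement is the Claim_ definition above) =====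
theorem get_common_elms_spec : Claim_equal_get_common_elms := by
  intro d _ _
  unfold Spec_get_common_elms
  exact pv_main d
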